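-- pv_equiv track=rewrite | github.com/KotisKotlyandii/lessons1 | ege22/178.py | f
-- ===== SOURCE A (Python) =====
-- def f(x):
--     m,s = 0,0
--     while x > 0:
--         d = x % 6
--         s += d
--         if d > m: m = d
--         x //= 6
--     return m,s
-- ===== SOURCE B (Python) =====
-- def f(x):
--     # Digit sum via the Legendre-style identity (x minus five times the sum of the
--     # quotients by the higher powers of six); max digit read off the quotients.
--     if x <= 0:
--         return 0, 0
--     powers = []
--     p = 1
--     while p <= x:
--         powers.append(p)
--         p *= 6
--     m = max((x // p) % 6 for p in powers)
--     s = x - 5 * sum(x // (6 * p) for p in powers)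
--     return m, s
-- ===== Notes on version B (the rewrite author's own statement) =====
-- stated objective: alternative
-- what changed: B replaces A's destructive remainder-accumulation loop by a non-destructive power-list algorithm: it precomputes the powers of six up to x, reads the max digit off the quotients, and computes the digit sum via the Legendre-style identity s = x minus five times the sum of the quotients by the higher powers.
import Mathlib
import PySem

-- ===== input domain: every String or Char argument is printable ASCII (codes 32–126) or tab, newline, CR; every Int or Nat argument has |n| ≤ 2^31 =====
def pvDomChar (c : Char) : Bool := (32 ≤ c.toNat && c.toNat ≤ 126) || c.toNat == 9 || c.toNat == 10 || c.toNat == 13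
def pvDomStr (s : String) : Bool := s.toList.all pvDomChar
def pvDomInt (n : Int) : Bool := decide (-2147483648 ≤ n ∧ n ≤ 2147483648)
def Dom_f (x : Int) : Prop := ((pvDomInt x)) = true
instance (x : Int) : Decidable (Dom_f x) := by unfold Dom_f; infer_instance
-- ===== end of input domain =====

-- B replaces A's destructive remainder-accumulation loop by a non-destructive power-list
-- algorithm: max digit off the quotients (x//p)%6, digit sum via s = x - 5*Σ⌊x/6^k⌋.

-- ===== PORT A =====
-- while x > 0: d = x%6; s += d; if d > m: m = d; x //= 6
def fLoop (x m s : Int) : Int × Int :=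
  if h : x > 0 then
    fLoop (PySem.Int.floordiv x 6) (if PySem.Int.mod x 6 > m then PySem.Int.mod x 6 else m)
      (s + PySem.Int.mod x 6)
  else (m, s)
termination_by x.toNat
decreasing_by
  have h6 : PySem.Int.floordiv x 6 = x / 6 := PySem.Int.floordiv_eq_ediv_of_pos (by omega)
  rw [h6]; omega

def f (x : Int) : Int × Int := fLoop x 0 0

-- ===== PORT B =====
-- powers = []; p = 1; while p <= x: powers.append(p); p *= 6
-- (the 0 < p argument only makes the same loop total; Python starts it at p = 1)
def powersLoop (x p : Int) (hp : 0 < p) : List Int :=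
  if h : p ≤ x then p :: powersLoop x (p * 6) (by omega) else []
termination_by (x + 1 - p).toNat
decreasing_by omega

-- m = max((x // p) % 6 for p in powers)  -- all terms ≥ 0 and the list is nonempty for
--   x > 0, so Python's max equals the fold of max from 0
-- s = x - 5 * sum(x // (6 * p) for p in powers)
def f_alt (x : Int) : Int × Int :=
  if x ≤ 0 then (0, 0)
  else
    let powers := powersLoop x 1 one_pos
    ((powers.map (fun p => PySem.Int.mod (PySem.Int.floordiv x p) 6)).foldl max 0,
     x - 5 * (powers.map (fun p => PySem.Int.floordiv x (6 * p))).sum)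

-- ===== PRECONDITION & SPEC =====
def Spec_f (x : Int) (out : Int × Int) : Prop := out = f_alt x
instance (x : Int) (out : Int × Int) : Decidable (Spec_f x out) := by unfold Spec_f; infer_instance

-- ===== CLAIM (what is proved, stated in full; the proofs are below) =====
def Claim_equal_f : Prop := ∀ (x : Int), Dom_f x → Spec_f x (f x)

-- ===== LEMMAS AND PROOFS =====


lemma powersLoop_shift (x p : Int) (hp : 0 < p) (hp6 : 0 < p * 6) :
    powersLoop x (p * 6) hp6 = (powersLoop (x / 6) p hp).map (· * 6) := by
  have H : ∀ n : Nat, ∀ p : Int, ∀ (hp : 0 < p) (hp6 : 0 < p * 6), (x + 1 - p).toNat = n →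
      powersLoop x (p * 6) hp6 = (powersLoop (x / 6) p hp).map (· * 6) := by
    intro n
    induction n using Nat.strong_induction_on with
    | _ n ih =>
      intro p hp hp6 hn
      by_cases h : p * 6 ≤ x
      · have h' : p ≤ x / 6 := (Int.le_ediv_iff_mul_le (by norm_num)).mpr h
        rw [powersLoop, dif_pos h]
        conv_rhs => rw [powersLoop, dif_pos h']
        rw [List.map_cons]
        have := ih ((x + 1 - p * 6).toNat) (by omega) (p * 6) hp6 (by omega) rfl
        rw [this]
      · have h' : ¬ p ≤ x / 6 := fun hc => h ((Int.le_ediv_iff_mul_le (by norm_num)).mp hc)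
        rw [powersLoop, dif_neg h]
        conv_rhs => rw [powersLoop, dif_neg h']
        rfl
  exact H (x + 1 - p).toNat p hp hp6 rfl

lemma foldl_max_shift (l : List Int) (a b : Int) :
    List.foldl max (max a b) l = max a (List.foldl max b l) := by
  induction l generalizing a b with
  | nil => rfl
  | cons c l ih => simp only [List.foldl, max_assoc, ih]

lemma powersLoop_mem_pos (x p : Int) (hp : 0 < p) :
    ∀ q ∈ powersLoop x p hp, 0 < q := by
  have H : ∀ n : Nat, ∀ p : Int, ∀ (hp : 0 < p), (x + 1 - p).toNat = n →
      ∀ q ∈ powersLoop x p hp, 0 < q := by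
    intro n
    induction n using Nat.strong_induction_on with
    | _ n ih =>
      intro p hp hn q hq
      by_cases h : p ≤ x
      · rw [powersLoop, dif_pos h] at hq
        rcases List.mem_cons.mp hq with h1 | h2
        · omega
        · exact ih ((x + 1 - p * 6).toNat) (by omega) (p * 6) (by omega) rfl q h2
      · rw [powersLoop, dif_neg h] at hq
        simp at hq
  exact H (x + 1 - p).toNat p hp rfl

-- f_alt with the PySem primitives unfolded into ediv/emod (all divisors positive there)
lemma f_alt_def' (x : Int) (hx : 0 < x) :
    f_alt x = (((powersLoop x 1 one_pos).map (fun p => (x / p) % 6)).foldl max 0,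
      x - 5 * ((powersLoop x 1 one_pos).map (fun p => x / (6 * p))).sum) := by
  simp only [f_alt, if_neg (show ¬ x ≤ 0 by omega)]
  have h1 : (powersLoop x 1 one_pos).map (fun p => PySem.Int.mod (PySem.Int.floordiv x p) 6)
      = (powersLoop x 1 one_pos).map (fun p => (x / p) % 6) := by
    apply List.map_congr_left
    intro q hq
    have hq0 := powersLoop_mem_pos x 1 one_pos q hq
    rw [PySem.Int.floordiv_eq_ediv_of_pos hq0, PySem.Int.mod_eq_emod_of_pos (by norm_num)]
  have h2 : (powersLoop x 1 one_pos).map (fun p => PySem.Int.floordiv x (6 * p))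
      = (powersLoop x 1 one_pos).map (fun p => x / (6 * p)) := by
    apply List.map_congr_left
    intro q hq
    have hq0 := powersLoop_mem_pos x 1 one_pos q hq
    rw [PySem.Int.floordiv_eq_ediv_of_pos (by omega)]
  rw [h1, h2]

lemma f_alt_rec (x : Int) (hx : 0 < x) :
    f_alt x = (max (x % 6) (f_alt (x / 6)).1, x % 6 + (f_alt (x / 6)).2) := by
  have hpl : powersLoop x 1 one_pos
      = 1 :: (powersLoop (x / 6) 1 one_pos).map (· * 6) := by
    rw [powersLoop, dif_pos (by omega : (1 : Int) ≤ x)]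
    congr 1
    exact powersLoop_shift x 1 one_pos (by norm_num)
  have hdvd := Int.mul_ediv_add_emod x 6
  rw [f_alt_def' x hx, hpl]
  by_cases hy : 0 < x / 6
  · rw [f_alt_def' (x / 6) hy]
    simp only [Prod.mk.injEq]
    refine ⟨?_, ?_⟩
    · -- first component
      simp only [List.map_cons, List.map_map, List.foldl]
      have hcong : (powersLoop (x / 6) 1 one_pos).map ((fun p => (x / p) % 6) ∘ (· * 6))
          = (powersLoop (x / 6) 1 one_pos).map (fun p => (x / 6 / p) % 6) := by
        apply List.map_congr_left
        intro q hq
        have hq0 := powersLoop_mem_pos (x / 6) 1 one_pos q hq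
        simp only [Function.comp]
        rw [show x / (q * 6) = x / (6 * q) by ring_nf, ← Int.ediv_ediv_of_nonneg (by norm_num : (0:Int) ≤ 6)]
      rw [hcong, Int.ediv_one, show max 0 (x % 6) = max (x % 6) 0 from max_comm 0 (x % 6),
        foldl_max_shift]
    · -- second component
      simp only [List.map_cons, List.map_map, List.sum_cons]
      have hcong : (powersLoop (x / 6) 1 one_pos).map ((fun p => x / (6 * p)) ∘ (· * 6))
          = (powersLoop (x / 6) 1 one_pos).map (fun p => x / 6 / (6 * p)) := by
        apply List.map_congr_left
        intro q hq
        simp only [Function.comp]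
        rw [show (6 : Int) * (q * 6) = 6 * (6 * q) by ring, ← Int.ediv_ediv_of_nonneg (by norm_num : (0:Int) ≤ 6)]
      rw [hcong, mul_one]
      ring_nf
      omega
  · have hy0 : x / 6 = 0 := by omega
    have hP : powersLoop (x / 6) 1 one_pos = [] := by
      rw [powersLoop, dif_neg (by omega)]
    rw [hP]
    simp only [f_alt, if_pos (show x / 6 ≤ 0 by omega), List.map_nil, List.map_cons,
      List.foldl, List.sum_cons, List.sum_nil, Int.ediv_one, mul_one, Prod.mk.injEq]
    refine ⟨?_, ?_⟩
    · omega
    · omega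

lemma le_foldl_max (l : List Int) (b : Int) : b ≤ List.foldl max b l := by
  induction l generalizing b with
  | nil => exact le_rfl
  | cons c l ih => exact le_trans (le_max_left b c) (ih (max b c))

lemma f_alt_fst_nonneg (x : Int) : 0 ≤ (f_alt x).1 := by
  rw [f_alt]
  split_ifs with h
  · norm_num
  · exact le_foldl_max _ 0

lemma fLoop_eq (x m s : Int) (hm : 0 ≤ m) :
    fLoop x m s = (max m (f_alt x).1, s + (f_alt x).2) := by
  have H : ∀ n : Nat, ∀ x m s : Int, x.toNat = n → 0 ≤ m →
      fLoop x m s = (max m (f_alt x).1, s + (f_alt x).2) := by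
    intro n
    induction n using Nat.strong_induction_on with
    | _ n ih =>
      intro x m s hn hm
      by_cases h : x > 0
      · have h6 : PySem.Int.floordiv x 6 = x / 6 := PySem.Int.floordiv_eq_ediv_of_pos (by omega)
        have hm6 : PySem.Int.mod x 6 = x % 6 := PySem.Int.mod_eq_emod_of_pos (by norm_num)
        have hr : 0 ≤ x % 6 := Int.emod_nonneg x (by norm_num)
        rw [fLoop, dif_pos h, h6, hm6,
          ih ((x / 6).toNat) (by omega) _ _ _ rfl (by split_ifs <;> omega),
          f_alt_rec x h]
        have hmax : (if x % 6 > m then x % 6 else m) = max m (x % 6) := by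
          rw [max_def]; split_ifs <;> omega
        rw [hmax]
        simp only [Prod.mk.injEq]
        refine ⟨?_, ?_⟩
        · rw [max_assoc]
        · rw [add_assoc]
      · rw [fLoop, dif_neg h, f_alt, if_pos (by omega)]
        simp only [Prod.mk.injEq]
        refine ⟨?_, ?_⟩
        · omega
        · omega
  exact H x.toNat x m s rfl hm

-- ===== VERDICT (by name: the statement is the Claim_ definition above) =====
theorem f_spec : Claim_equal_f := by
  intro x _
  show f x = f_alt x
  rw [f, fLoop_eq x 0 0 le_rfl]
  have := f_alt_fst_nonneg x
  have h1 : max 0 (f_alt x).1 = (f_alt x).1 := max_eq_right this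
  rw [h1, zero_add]
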